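-- pv_equiv track=rewrite | github.com/ferrolho/coding-challenges | Advent of Code/2017/21/puzzle1and2.py | mergePatterns
-- ===== SOURCE A (Python) =====
-- def mergePatterns(squares):
--     struct = [[row.split('/') for row in square] for square in squares]
--
--     result = ''
--
--     for row in struct:
--         while row[0]:
--             for square in row:
--                 result += square.pop(0)
--             result += '/'
--
--     return result[:-1]
-- ===== SOURCE B (Python) =====
-- def mergePatterns(squares):
--     lines = []
--     for band in squares:
--         grids = [sq.split('/') for sq in band]
--         for i in range(len(grids[0])):
--             lines.append(''.join(g[i] for g in grids))
--     return '/'.join(lines)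
-- ===== Notes on version B (the rewrite author's own statement) =====
-- stated objective: faster
-- what changed: Replaces the destructive while/pop(0) interleave with repeated 'result +=' and trailing-slash trimming by an index-based transpose per band (one assembled line per row index of the first square), collecting the lines in a list and joining once with '/'.
import Mathlib
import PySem

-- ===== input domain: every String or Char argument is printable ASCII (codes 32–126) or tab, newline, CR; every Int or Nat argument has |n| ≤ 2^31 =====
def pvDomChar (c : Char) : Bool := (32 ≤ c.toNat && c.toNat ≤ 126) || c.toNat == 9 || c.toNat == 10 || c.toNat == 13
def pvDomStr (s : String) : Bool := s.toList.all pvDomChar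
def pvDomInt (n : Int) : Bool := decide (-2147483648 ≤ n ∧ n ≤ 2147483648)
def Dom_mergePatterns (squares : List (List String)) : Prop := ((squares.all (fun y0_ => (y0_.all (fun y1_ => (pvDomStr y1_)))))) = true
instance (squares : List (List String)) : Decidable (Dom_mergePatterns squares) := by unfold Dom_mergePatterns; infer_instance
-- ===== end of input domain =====

-- B replaces A's destructive while/pop(0) interleave + trailing-slash trim by an index-based
-- per-band transpose whose assembled lines are joined once with '/': idiomatic, no mutation.


-- ===== PORT A =====
-- row.split('/') with the literal separator "/" (never empty, so split? is some)
def pySplitSlash (s : String) : List String := (PySem.Str.split? s "/").getD []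

-- the 'while row[0]: for square in row: result += square.pop(0); result += "/"' loop;
-- 'row[0]' on an empty band and 'pop(0)' on an exhausted square raise in Python
-- (here: base case / headD default), excluded by Pre_
def mergeBand (row : List (List String)) (acc : String) : String :=
  match row with
  | [] => acc
  | first :: rest =>
    if h : first = [] then acc
    else
      mergeBand (first.tail :: rest.map List.tail)
        (((first :: rest).foldl (fun a sq => a ++ sq.headD "") acc) ++ "/")
termination_by (row.headD []).length
decreasing_by
  simp only [List.headD_cons, List.length_tail]
  have : 0 < first.length := List.length_pos_iff.mpr h
  omega

def mergePatterns (squares : List (List String)) : String :=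
  let struct := squares.map (fun square => square.map (fun row => pySplitSlash row))
  let result := struct.foldl (fun acc row => mergeBand row acc) ""
  PySem.Str.slice result none (some (-1))

-- ===== PORT B =====
-- "for i in range(len(grids[0])): lines.append(''.join(g[i] for g in grids))";
-- 'grids[0]' on an empty band and 'g[i]' past the end raise in Python
-- (here: headD/getD defaults), excluded by Pre_
def bandLines (grids : List (List String)) : List String :=
  (List.range (grids.headD []).length).map
    (fun i => PySem.Str.join "" (grids.map (fun g => g.getD i "")))

def mergePatterns_alt (squares : List (List String)) : String :=
  let lines := squares.foldl
    (fun ls band => ls ++ bandLines (band.map (fun sq => pySplitSlash sq))) []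
  PySem.Str.join "/" lines

-- ===== PRECONDITION & SPEC =====
-- Pre_ holds exactly where Python A (and Python B) returns: every band is nonempty and no
-- square of a band splits into fewer lines than the band's first square (otherwise
-- row[0] / pop(0) in A, grids[0] / g[i] in B raise IndexError).
def Pre_mergePatterns (squares : List (List String)) : Prop :=
  ∀ band ∈ squares, band ≠ [] ∧
    ∀ sq ∈ band, (pySplitSlash (band.headD "")).length ≤ (pySplitSlash sq).length
instance (squares : List (List String)) : Decidable (Pre_mergePatterns squares) := by
  unfold Pre_mergePatterns; infer_instance

def pvWitness_mergePatterns : List (List String) := [["ab/cd", "ef/gh"], ["x", "y"]]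

def Spec_mergePatterns (squares : List (List String)) (out : String) : Prop :=
  out = mergePatterns_alt squares
instance (squares : List (List String)) (out : String) : Decidable (Spec_mergePatterns squares out) := by
  unfold Spec_mergePatterns; infer_instance

-- ===== CLAIM (what is proved, stated in full; the proofs are below) =====
def Claim_equal_mergePatterns : Prop := ∀ (squares : List (List String)), Dom_mergePatterns squares → Pre_mergePatterns squares → Spec_mergePatterns squares (mergePatterns squares)

-- ===== LEMMAS AND PROOFS =====

-- Chars.join with the empty separator is flatten
theorem joinNil_flatten (ls : List (List Char)) : PySem.Chars.join [] ls = ls.flatten := by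
  match ls with
  | [] => simp [PySem.Chars.join_nil]
  | [p] => simp [PySem.Chars.join_singleton]
  | p :: q :: rest =>
    rw [PySem.Chars.join_cons_cons, joinNil_flatten (q :: rest)]
    simp

-- g[0] with a default is the default head
theorem getD_zero_headD (l : List String) : l.getD 0 "" = l.headD "" := by
  cases l <;> simp

-- g[i+1] with a default is g.tail[i]
theorem getD_succ_tail (l : List String) (i : Nat) : l.getD (i + 1) "" = l.tail.getD i "" := by
  cases l <;> simp

-- one step of the index transpose: line 0, then the transpose of the tails
theorem bandLines_cons (first : List String) (rest : List (List String)) (hf : first ≠ []) :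
    bandLines (first :: rest)
      = PySem.Str.join "" ((first :: rest).map (fun g => g.headD ""))
        :: bandLines (first.tail :: rest.map List.tail) := by
  cases first with
  | nil => exact absurd rfl hf
  | cons a ft =>
    unfold bandLines
    simp only [List.headD_cons, List.length_cons, List.range_succ_eq_map, List.map_cons,
      List.map_map, List.tail_cons]
    congr 1
    · refine congrArg (PySem.Str.join "") ?_
      exact congrArg₂ List.cons (getD_zero_headD (a :: ft))
        (List.map_congr_left fun g _ => getD_zero_headD g)
    · refine List.map_congr_left fun i _ => ?_
      simp only [Function.comp_apply]
      refine congrArg (PySem.Str.join "") ?_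
      exact congrArg₂ List.cons (getD_succ_tail (a :: ft) i)
        (List.map_congr_left fun g _ => getD_succ_tail g i)

-- the inner 'for square in row: result += square.pop(0)' fold, on toList
theorem foldl_heads (l : List (List String)) (a : String) :
    (l.foldl (fun a sq => a ++ sq.headD "") a).toList
      = a.toList ++ (l.map (fun sq => (sq.headD "").toList)).flatten := by
  induction l generalizing a with
  | nil => simp
  | cons x t ih =>
    rw [List.foldl_cons, ih]
    simp [List.append_assoc]

-- while-loop vs index transpose, per band
theorem mergeBand_eq (row : List (List String)) (acc : String) :
    (mergeBand row acc).toList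
      = acc.toList ++ ((bandLines row).map (fun s => s.toList ++ ['/'])).flatten := by
  match row with
  | [] =>
    rw [mergeBand.eq_def]
    simp [bandLines]
  | first :: rest =>
    by_cases hf : first = []
    · rw [mergeBand.eq_def]
      subst hf
      simp [bandLines]
    · rw [mergeBand.eq_def]
      simp only [dif_neg hf]
      rw [mergeBand_eq (first.tail :: rest.map List.tail) _, bandLines_cons first rest hf]
      simp only [List.map_cons, List.flatten_cons, String.toList_append, foldl_heads]
      have hjoin : (PySem.Str.join "" (first.headD "" :: rest.map (fun g => g.headD ""))).toList
          = ((first :: rest).map (fun sq => (sq.headD "").toList)).flatten := by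
        rw [PySem.Str.toList_join]
        have h0 : ("" : String).toList = [] := rfl
        rw [h0, joinNil_flatten]
        simp [List.map_map, Function.comp_def]
      have hs : ("/" : String).toList = ['/'] := rfl
      rw [hjoin, hs]
      simp [List.append_assoc]
termination_by (row.headD []).length
decreasing_by
  simp only [List.headD_cons, List.length_tail]
  have : 0 < first.length := List.length_pos_iff.mpr hf
  omega

-- the outer for-loop over bands, on toList
theorem foldl_bands (struct : List (List (List String))) (acc : String) :
    (struct.foldl (fun acc row => mergeBand row acc) acc).toList
      = acc.toList
        ++ ((struct.flatMap (fun row => bandLines row)).map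
              (fun s => s.toList ++ ['/'])).flatten := by
  induction struct generalizing acc with
  | nil => simp
  | cons row t ih =>
    rw [List.foldl_cons, ih, mergeBand_eq row acc]
    simp [List.append_assoc]

-- dropping the final '/' from the slash-terminated concatenation is joining with '/'
theorem dropLast_slash (ls : List (List Char)) :
    ((ls.map (fun l => l ++ ['/'])).flatten).dropLast = PySem.Chars.join ['/'] ls := by
  match ls with
  | [] => simp [PySem.Chars.join_nil]
  | [x] => simp [PySem.Chars.join_singleton]
  | x :: y :: t =>
    have hne : (((y :: t).map (fun l => l ++ ['/'])).flatten) ≠ [] := by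
      simp
    have hsplit : ((x :: y :: t).map (fun l => l ++ ['/'])).flatten
        = (x ++ ['/']) ++ ((y :: t).map (fun l => l ++ ['/'])).flatten := by
      simp
    rw [hsplit, List.dropLast_append_of_ne_nil hne, dropLast_slash (y :: t),
        PySem.Chars.join_cons_cons]

-- B's accumulator loop is the flatMap of its body
theorem foldl_lines (squares : List (List String)) (init : List String) :
    squares.foldl
      (fun ls band => ls ++ bandLines (band.map (fun sq => pySplitSlash sq))) init
    = init ++ squares.flatMap
        (fun band => bandLines (band.map (fun sq => pySplitSlash sq))) := by
  induction squares generalizing init with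
  | nil => simp
  | cons b t ih => simp [List.foldl_cons, ih, List.append_assoc]

-- ===== VERDICT (by name: the statement is the Claim_ definition above) =====
theorem mergePatterns_spec : Claim_equal_mergePatterns := by
  intro squares _ _
  unfold Spec_mergePatterns mergePatterns mergePatterns_alt
  apply String.toList_injective
  rw [foldl_lines]
  rw [PySem.Str.slice_to_neg_one, foldl_bands]
  have h0 : ("" : String).toList = [] := rfl
  rw [h0, List.nil_append, List.nil_append]
  rw [PySem.Str.toList_join]
  have hsep : ("/" : String).toList = ['/'] := rfl
  rw [hsep, ← dropLast_slash]
  congr 1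
  simp [List.map_map, Function.comp_def, List.flatMap_map]
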